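-- pv_equiv track=rewrite | github.com/raghadjam/AppliedCryptography | MITM_TripleDES/task3_mitm.py | add_des_parity
-- ===== SOURCE A (Python) =====
-- def add_des_parity(hex56):
--     key56 = bytes.fromhex(hex56)
--     out = []
--     for b in key56:
--         b &= 0xFE
--         if bin(b).count("1") % 2 == 0:
--             b |= 1
--         out.append(f"{b:02x}")
--     return "".join(out)
-- ===== SOURCE B (Python) =====
-- def _fix(v):
--     # parity of the high 7 bits via xor-folding; set LSB iff that parity is even
--     p = v & 0xFE
--     t = p ^ (p >> 4)
--     t ^= t >> 2
--     t ^= t >> 1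
--     return p | ((t & 1) ^ 1)
--
-- _TABLE = bytes(_fix(v) for v in range(256))
--
-- def add_des_parity(hex56):
--     return bytes.fromhex(hex56).translate(_TABLE).hex()
-- ===== Notes on version B (the rewrite author's own statement) =====
-- stated objective: idiomatic
-- what changed: B precomputes a 256-entry translation table (parity via xor-folding shifts instead of counting one-bits of the bin() string) and applies it with a single bytes.translate pass plus bytes.hex(), replacing A's per-byte format-and-append loop.
import Mathlib
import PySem

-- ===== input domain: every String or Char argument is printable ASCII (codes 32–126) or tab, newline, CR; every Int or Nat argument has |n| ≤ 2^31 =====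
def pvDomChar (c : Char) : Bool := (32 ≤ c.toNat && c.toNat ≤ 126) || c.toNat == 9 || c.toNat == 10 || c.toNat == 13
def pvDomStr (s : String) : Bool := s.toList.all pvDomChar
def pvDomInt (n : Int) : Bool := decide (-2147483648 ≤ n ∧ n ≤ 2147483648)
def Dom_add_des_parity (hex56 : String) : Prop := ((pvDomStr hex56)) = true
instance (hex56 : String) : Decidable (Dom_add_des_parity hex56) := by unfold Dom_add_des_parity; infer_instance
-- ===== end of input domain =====

-- B builds a 256-entry table once and bulk-translates; same output as A on all valid hex (idiomatic alternative, not claimed faster).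

-- ===== PORT A =====
-- shared helper: bytes.fromhex — value of a hex digit, none for a non-hex char
def pvHexVal? (c : Char) : Option Nat :=
  if '0' ≤ c ∧ c ≤ '9' then some (c.toNat - 48)
  else if 'a' ≤ c ∧ c ≤ 'f' then some (c.toNat - 87)
  else if 'A' ≤ c ∧ c ≤ 'F' then some (c.toNat - 55)
  else none

-- ASCII whitespace bytes.fromhex skips between byte pairs (Dom admits only these four)
def pvIsWs (c : Char) : Bool := c = ' ' || c = '\t' || c = '\n' || c = '\r'

-- shared helper: bytes.fromhex(s) as a byte list; none exactly where Python raises ValueError (on Dom)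
def pvFromhex? : List Char → Option (List Nat)
  | [] => some []
  | c :: cs =>
    if pvIsWs c then pvFromhex? cs
    else match pvHexVal? c, cs with
      | some h, c2 :: cs2 =>
        match pvHexVal? c2 with
        | some l => (pvFromhex? cs2).map (fun r => (16 * h + l) :: r)
        | none => none
      | _, _ => none

-- bin(n) for n ≥ 0, as a char list ("0b…")
def pvBinDigitsAux : Nat → Nat → List Char
  | 0, _ => []
  | fuel + 1, n =>
    if n = 0 then [] else pvBinDigitsAux fuel (n / 2) ++ [if n % 2 = 1 then '1' else '0']
-- fuel n is always enough since n/2 < n at every step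
def pvBinDigits (n : Nat) : List Char := pvBinDigitsAux n n
def pvBin (n : Nat) : List Char := '0' :: 'b' :: (if n = 0 then ['0'] else pvBinDigits n)

-- f"{b:02x}" — exact for b < 256 (all bytes here are < 256)
def pvHexDigit (n : Nat) : Char := if n < 10 then Char.ofNat (48 + n) else Char.ofNat (87 + n)
def pvFmt02x (b : Nat) : List Char := [pvHexDigit (b / 16), pvHexDigit (b % 16)]

def add_des_parity (hex56 : String) : String :=
  match pvFromhex? hex56.toList with
  | none => ""   -- Python raises ValueError here; excluded by Pre_
  | some key56 =>
    let out := key56.foldl (fun acc b =>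
      let b1 := b &&& 0xFE
      let b2 := if (pvBin b1).count '1' % 2 = 0 then b1 ||| 1 else b1
      acc ++ [pvFmt02x b2]) []
    String.mk out.flatten   -- "".join(out)

-- ===== PORT B =====
-- _fix: parity of the high 7 bits via xor-folding shifts
def pvFix (v : Nat) : Nat :=
  let p := v &&& 0xFE
  let t := p ^^^ (p >>> 4)
  let t := t ^^^ (t >>> 2)
  let t := t ^^^ (t >>> 1)
  p ||| ((t &&& 1) ^^^ 1)

def pvTable : List Nat := (List.range 256).map pvFix

def add_des_parity_alt (hex56 : String) : String :=
  match pvFromhex? hex56.toList with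
  | none => ""   -- bytes.fromhex raises ValueError here; excluded by Pre_
  | some key56 =>
    -- .translate(_TABLE) then .hex()
    String.mk ((key56.map (fun b => pvTable.getD b 0)).map pvFmt02x).flatten

-- ===== PRECONDITION & SPEC =====
-- Pre_: exactly the inputs bytes.fromhex accepts (on Dom): every whitespace-separated
-- token has even length and only hex digits.
def Pre_add_des_parity (hex56 : String) : Prop :=
  (PySem.Str.split₀ hex56).all
    (fun t => t.toList.length % 2 == 0 && t.toList.all (fun c => (pvHexVal? c).isSome)) = true
instance (hex56 : String) : Decidable (Pre_add_des_parity hex56) := by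
  unfold Pre_add_des_parity; infer_instance

def pvWitness_add_des_parity : String := "00ff 0123456789"

def Spec_add_des_parity (hex56 : String) (out : String) : Prop := out = add_des_parity_alt hex56
instance (hex56 : String) (out : String) : Decidable (Spec_add_des_parity hex56 out) := by unfold Spec_add_des_parity; infer_instance

-- ===== CLAIM (what is proved, stated in full; the proofs are below) =====
def Claim_equal_add_des_parity : Prop := ∀ (hex56 : String), Dom_add_des_parity hex56 → Pre_add_des_parity hex56 → Spec_add_des_parity hex56 (add_des_parity hex56)

-- ===== LEMMAS AND PROOFS =====

-- per-byte agreement: A's parity-fix equals B's table entry, for every byte value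
set_option maxRecDepth 4096 in
theorem pv_step_eq : ∀ v : Fin 256,
    (if (pvBin (v.val &&& 0xFE)).count '1' % 2 = 0 then (v.val &&& 0xFE) ||| 1 else (v.val &&& 0xFE)) = pvTable.getD v.val 0 := by
  decide

-- a hex digit's value is < 16
theorem pvHexVal?_lt {c : Char} {h : Nat} (hh : pvHexVal? c = some h) : h < 16 := by
  unfold pvHexVal? at hh
  split_ifs at hh with h1 h2 h3 <;> injection hh with hh <;> subst hh
  · have hu : c.toNat ≤ 57 := UInt32.le_iff_toNat_le.mp (Char.le_def.mp h1.2)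
    omega
  · have hu : c.toNat ≤ 102 := UInt32.le_iff_toNat_le.mp (Char.le_def.mp h2.2)
    omega
  · have hu : c.toNat ≤ 70 := UInt32.le_iff_toNat_le.mp (Char.le_def.mp h3.2)
    omega

-- on every byte list the parser can produce, A's per-byte transform agrees with B's table lookup
theorem pv_map_eq (cs : List Char) (bs : List Nat) (h : pvFromhex? cs = some bs) :
    bs.map (fun b => pvFmt02x (if (pvBin (b &&& 0xFE)).count '1' % 2 = 0 then (b &&& 0xFE) ||| 1 else (b &&& 0xFE)))
      = bs.map (fun b => pvFmt02x (pvTable.getD b 0)) := by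
  induction cs using pvFromhex?.induct generalizing bs with
  | case1 =>
    simp [pvFromhex?] at h; subst h; simp
  | case2 c cs hws ih =>
    rw [pvFromhex?.eq_def] at h
    simp only [if_pos hws] at h
    exact ih bs h
  | case3 c hws hv c2 cs2 hhv l hl ih =>
    rw [pvFromhex?.eq_def] at h
    simp only [if_neg hws, hhv, hl, Option.map_eq_some_iff] at h
    obtain ⟨r, hr, hbs⟩ := h
    subst hbs
    simp only [List.map_cons, ih r hr, List.cons.injEq, and_true]
    have h256 : 16 * hv + l < 256 := by
      have := pvHexVal?_lt hhv; have := pvHexVal?_lt hl; omega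
    exact congrArg pvFmt02x (pv_step_eq ⟨16 * hv + l, h256⟩)
  | case4 c hws hv c2 cs2 hhv hl =>
    rw [pvFromhex?.eq_def] at h
    simp [if_neg hws, hhv, hl] at h
  | case5 c cs hws hno =>
    rw [pvFromhex?.eq_def] at h
    simp only [if_neg hws] at h
    cases h

theorem add_des_parity_spec : Claim_equal_add_des_parity := by
  intro hex56 _ _
  unfold Spec_add_des_parity add_des_parity add_des_parity_alt
  cases hf : pvFromhex? hex56.toList with
  | none => rfl
  | some bs =>
    show String.mk ((bs.foldl (fun acc b =>
        acc ++ [pvFmt02x (if (pvBin (b &&& 0xFE)).count '1' % 2 = 0 then (b &&& 0xFE) ||| 1 else (b &&& 0xFE))]) [])).flatten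
      = String.mk ((bs.map (fun b => pvTable.getD b 0)).map pvFmt02x).flatten
    rw [PySem.List.foldl_append_singleton_eq_map]
    rw [pv_map_eq hex56.toList bs hf]
    simp [List.map_map, Function.comp_def]
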